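-- pv_equiv track=rewrite | github.com/vijaygirish2001/CTC_problems | Others/q7.py | srt_pos_neg
-- ===== SOURCE A (Python) =====
-- def srt_pos_neg(arr):
--     arr_pos = []
--     arr_neg = []
--
--     for i in arr:
--         if i>=0:
--             arr_pos.append(i)
--         else:
--             arr_neg.append(i)
--
--     fin_arr =[]
--     ind_alt = 0
--     while arr_pos or arr_neg:
--         if arr_pos and ind_alt ==0:
--             fin_arr.append(arr_pos.pop(0))
--
--         elif arr_neg and ind_alt == 1:
--             fin_arr.append(arr_neg.pop(0))
--         ind_alt = 1 - ind_alt
--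
--     return fin_arr
-- ===== SOURCE B (Python) =====
-- def srt_pos_neg(arr):
--     pos = [x for x in arr if x >= 0]
--     neg = [x for x in arr if x < 0]
--     out = []
--     for p, n in zip(pos, neg):
--         out += [p, n]
--     k = min(len(pos), len(neg))
--     return out + pos[k:] + neg[k:]
-- ===== Notes on version B (the rewrite author's own statement) =====
-- stated objective: simpler
-- what changed: A's while loop with an alternation toggle and pop(0) queue operations is replaced by zipping the positive and negative sublists into pairs and appending the leftover tail of the longer one.
import Mathlib
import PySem

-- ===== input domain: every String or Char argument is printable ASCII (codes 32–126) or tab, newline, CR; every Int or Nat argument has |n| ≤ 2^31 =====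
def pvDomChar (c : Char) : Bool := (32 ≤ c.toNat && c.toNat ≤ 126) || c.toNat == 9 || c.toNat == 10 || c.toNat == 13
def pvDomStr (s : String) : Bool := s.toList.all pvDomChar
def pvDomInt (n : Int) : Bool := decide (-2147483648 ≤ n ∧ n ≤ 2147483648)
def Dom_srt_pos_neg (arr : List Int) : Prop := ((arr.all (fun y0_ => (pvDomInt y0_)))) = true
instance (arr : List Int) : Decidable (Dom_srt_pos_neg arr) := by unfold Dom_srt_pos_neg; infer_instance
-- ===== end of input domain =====

-- B replaces A's toggle-and-pop(0) queue loop by zipping the two split lists into pairs and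
-- appending the leftover tails (objective: simpler; no speed claim).

-- ===== PORT A =====
-- A's while loop as structural recursion on the state (arr_pos, arr_neg, fin_arr, ind_alt);
-- pop(0) is head-cons, the empty-list-with-matching-toggle cases are the loop's no-append passes.
def srtLoopA : List Int → List Int → List Int → Nat → List Int
  | [], [], fin, _ => fin
  | p :: ps, neg, fin, 0 => srtLoopA ps neg (fin ++ [p]) 1
  | [], n :: ns, fin, 0 => srtLoopA [] (n :: ns) fin 1
  | pos, n :: ns, fin, _ + 1 => srtLoopA pos ns (fin ++ [n]) 0
  | p :: ps, [], fin, _ + 1 => srtLoopA (p :: ps) [] fin 0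
  termination_by pos neg _ ind =>
    2 * (pos.length + neg.length) +
      (if ind = 0 then (if pos = [] then 1 else 0) else (if neg = [] then 1 else 0))
  decreasing_by all_goals (simp only [List.length_cons, List.length_nil, reduceIte]; (try split_ifs) <;> omega)

def srt_pos_neg (arr : List Int) : List Int :=
  let pn := arr.foldl (fun (pn : List Int × List Int) i =>
      if i ≥ 0 then (pn.1 ++ [i], pn.2) else (pn.1, pn.2 ++ [i])) ([], [])
  srtLoopA pn.1 pn.2 [] 0

-- ===== PORT B =====
def srt_pos_neg_alt (arr : List Int) : List Int :=
  let pos := arr.filter (fun x => x ≥ 0)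
  let neg := arr.filter (fun x => x < 0)
  let out := (pos.zip neg).foldl (fun out pn => out ++ [pn.1, pn.2]) []
  let k := min pos.length neg.length
  out ++ pos.drop k ++ neg.drop k

-- ===== PRECONDITION & SPEC =====
def Spec_srt_pos_neg (arr : List Int) (out : List Int) : Prop := out = srt_pos_neg_alt arr
instance (arr : List Int) (out : List Int) : Decidable (Spec_srt_pos_neg arr out) := by unfold Spec_srt_pos_neg; infer_instance

-- ===== CLAIM (what is proved, stated in full; the proofs are below) =====
def Claim_equal_srt_pos_neg : Prop := ∀ (arr : List Int), Dom_srt_pos_neg arr → Spec_srt_pos_neg arr (srt_pos_neg arr)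

-- ===== LEMMAS AND PROOFS =====

-- canonical interleaving: head of the first list, then the roles swap
def itl : List Int → List Int → List Int
  | [], ys => ys
  | x :: xs, ys => x :: itl ys xs
  termination_by xs ys => xs.length + ys.length
  decreasing_by simp [List.length]; omega

theorem itl_nil_right (xs : List Int) : itl xs [] = xs := by
  cases xs with
  | nil => simp [itl]
  | cons x xs => rw [itl, itl]

-- A's loop appends the canonical interleaving (roles set by the toggle)
theorem srtLoopA_eq : ∀ (pos neg fin : List Int) (ind : Nat),
    srtLoopA pos neg fin ind = fin ++ (if ind = 0 then itl pos neg else itl neg pos) := by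
  intro pos neg fin ind
  induction pos, neg, fin, ind using srtLoopA.induct with
  | case1 fin ind => rcases Nat.eq_zero_or_pos ind with h | h <;> simp [srtLoopA, itl]
  | case2 p ps neg fin ih => rw [srtLoopA, ih]; simp [itl]
  | case3 n ns fin ih => rw [srtLoopA, ih]; simp [itl]
  | case4 pos n ns fin k ih => rw [srtLoopA, ih]; simp [itl]
  | case5 p ps fin k ih => rw [srtLoopA, ih]; simp [itl, itl_nil_right]

-- A's split-by-append foldl computes the two filters
theorem split_foldl (arr : List Int) : ∀ (p n : List Int),
    arr.foldl (fun (pn : List Int × List Int) i =>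
      if i ≥ 0 then (pn.1 ++ [i], pn.2) else (pn.1, pn.2 ++ [i])) (p, n)
    = (p ++ arr.filter (fun x => x ≥ 0), n ++ arr.filter (fun x => x < 0)) := by
  induction arr with
  | nil => simp
  | cons a l ih =>
    intro p n
    by_cases ha : a ≥ 0
    · have ha' : ¬ a < 0 := by omega
      simp [List.foldl, ha, ha', ih, List.filter]
    · have ha' : a < 0 := by omega
      simp [List.foldl, ha, ha', ih, List.filter]

theorem foldl_pairs_acc (l : List (Int × Int)) : ∀ acc : List Int,
    l.foldl (fun out pn => out ++ [pn.1, pn.2]) acc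
    = acc ++ l.foldl (fun out pn => out ++ [pn.1, pn.2]) [] := by
  induction l with
  | nil => simp
  | cons a l ih =>
    intro acc
    simp only [List.foldl]
    rw [ih (acc ++ [a.1, a.2]), ih ([] ++ [a.1, a.2])]
    simp

-- B's zip-and-tails assembly equals the canonical interleaving
theorem zip_tails_eq_itl : ∀ (pos neg : List Int),
    ((pos.zip neg).foldl (fun out pn => out ++ [pn.1, pn.2]) [])
      ++ pos.drop (min pos.length neg.length) ++ neg.drop (min pos.length neg.length)
    = itl pos neg := by
  intro pos
  induction pos with
  | nil => intro neg; simp [itl]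
  | cons x xs ih =>
    intro neg
    cases neg with
    | nil => simp [itl_nil_right]
    | cons y ys =>
      simp only [List.zip_cons_cons, List.foldl, List.length_cons]
      rw [foldl_pairs_acc]
      have hmin : min (xs.length + 1) (ys.length + 1) = min xs.length ys.length + 1 := by omega
      simp only [hmin, List.drop_succ_cons]
      rw [itl, itl]
      rw [← ih ys]
      simp

theorem srt_pos_neg_eq_alt (arr : List Int) : srt_pos_neg arr = srt_pos_neg_alt arr := by
  unfold srt_pos_neg srt_pos_neg_alt
  rw [split_foldl arr [] []]
  simp only [List.nil_append]
  rw [srtLoopA_eq]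
  rw [← zip_tails_eq_itl]
  simp

-- ===== VERDICT (by name: the statement is the Claim_ definition above) =====
theorem srt_pos_neg_spec : Claim_equal_srt_pos_neg := by
  intro arr _
  unfold Spec_srt_pos_neg
  exact srt_pos_neg_eq_alt arr
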